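-- pv_equiv track=rewrite | github.com/dabsdamoon/my-little-skills | skills/prompt-optimizer/scripts/token_counter.py | find_dynamic_boundary
-- ===== SOURCE A (Python) =====
-- def find_dynamic_boundary(text: str) -> int:
--     """Find where dynamic content begins in the prompt."""
--     markers = [
--         "{user", "{context", "{query", "{input", "{message",
--         "{{", "[USER", "[CONTEXT", "[QUERY", "[INPUT",
--         "<user>", "<context>", "<query>", "<input>",
--     ]
--     first_pos = len(text)
--     for marker in markers:
--         pos = text.lower().find(marker.lower())
--         if pos != -1 and pos < first_pos:
--             first_pos = pos
--     return first_pos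
-- ===== SOURCE B (Python) =====
-- MARKERS = [
--     "{user", "{context", "{query", "{input", "{message",
--     "{{", "[USER", "[CONTEXT", "[QUERY", "[INPUT",
--     "<user>", "<context>", "<query>", "<input>",
-- ]
--
-- def find_dynamic_boundary(text: str) -> int:
--     """Find where dynamic content begins: one forward pass over the lowered
--     text, returning the first index where any marker starts."""
--     lowered = text.lower()
--     lmarkers = [m.lower() for m in MARKERS]
--     for i in range(len(lowered)):
--         if any(lowered.startswith(m, i) for m in lmarkers):
--             return i
--     return len(text)
-- ===== Notes on version B (the rewrite author's own statement) =====
-- stated objective: alternative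
-- what changed: Replaces 14 independent full-text find() scans combined by a running minimum with a single left-to-right scan of the lowered text that returns at the first position where any marker starts.
import Mathlib
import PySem

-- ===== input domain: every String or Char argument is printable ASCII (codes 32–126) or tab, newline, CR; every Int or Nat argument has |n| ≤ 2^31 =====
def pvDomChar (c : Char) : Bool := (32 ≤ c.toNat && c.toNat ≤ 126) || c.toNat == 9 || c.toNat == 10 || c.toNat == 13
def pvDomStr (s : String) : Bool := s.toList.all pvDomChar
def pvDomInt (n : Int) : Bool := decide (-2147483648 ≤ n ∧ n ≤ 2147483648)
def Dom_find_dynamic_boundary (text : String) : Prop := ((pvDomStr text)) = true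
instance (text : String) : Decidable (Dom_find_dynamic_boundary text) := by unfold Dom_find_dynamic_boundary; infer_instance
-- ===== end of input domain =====

-- B replaces A's 14 independent full-text find() scans + running minimum by one
-- left-to-right scan of the lowered text that stops at the first marker start (alternative decomposition).

def pvMarkers : List String :=
  ["{user", "{context", "{query", "{input", "{message",
   "{{", "[USER", "[CONTEXT", "[QUERY", "[INPUT",
   "<user>", "<context>", "<query>", "<input>"]

-- ===== PORT A =====
def find_dynamic_boundary (text : String) : Int :=
  pvMarkers.foldl
    (fun first_pos marker =>
      let pos := PySem.Str.find (PySem.Str.lower text) (PySem.Str.lower marker)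
      if pos ≠ -1 ∧ pos < first_pos then pos else first_pos)
    (PySem.Str.len text)

-- ===== PORT B =====
-- pvScan ms s i: s is the suffix of the lowered text starting at index i;
-- returns the first index at which some marker starts (Python's 'lowered.startswith(m, i)').
def pvScan (ms : List (List Char)) : List Char → Nat → Option Nat
  | [], _ => none
  | c :: rest, i =>
    if ms.any (fun m => PySem.Chars.startswith (c :: rest) m) then some i
    else pvScan ms rest (i + 1)

def find_dynamic_boundary_alt (text : String) : Int :=
  let lowered := PySem.Chars.lower text.toList
  let lms := pvMarkers.map (fun m => PySem.Chars.lower m.toList)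
  match pvScan lms lowered 0 with
  | some i => (i : Int)
  | none => PySem.Str.len text

-- ===== PRECONDITION & SPEC =====
def Spec_find_dynamic_boundary (text : String) (out : Int) : Prop := out = find_dynamic_boundary_alt text
instance (text : String) (out : Int) : Decidable (Spec_find_dynamic_boundary text out) := by unfold Spec_find_dynamic_boundary; infer_instance

-- ===== CLAIM (what is proved, stated in full; the proofs are below) =====
def Claim_equal_find_dynamic_boundary : Prop := ∀ (text : String), Dom_find_dynamic_boundary text → Spec_find_dynamic_boundary text (find_dynamic_boundary text)

-- ===== LEMMAS AND PROOFS =====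

-- Proof-only abbreviation for A's fold step.
def pvStep (L : List Char) (first_pos : Int) (sub : List Char) : Int :=
  if PySem.Chars.find L sub ≠ -1 ∧ PySem.Chars.find L sub < first_pos
  then PySem.Chars.find L sub else first_pos

-- A's fold, rewritten over the lowered markers.
theorem pvA_eq (text : String) :
    find_dynamic_boundary text =
      (pvMarkers.map (fun m => PySem.Chars.lower m.toList)).foldl
        (pvStep (PySem.Chars.lower text.toList)) ((text.toList.length : Int)) := by
  unfold find_dynamic_boundary pvStep
  rw [List.foldl_map]
  simp [PySem.Str.find, PySem.Str.lower]

-- Lowering is per-character, so it preserves length.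
theorem pv_length_lower (s : List Char) : (PySem.Chars.lower s).length = s.length := by
  simp [PySem.Chars.lower]

-- If the scan fails, no marker occurs anywhere in the scanned suffix (markers are nonempty).
theorem pv_scan_none (ms : List (List Char)) (hne : ∀ m ∈ ms, m ≠ []) :
    ∀ (s : List Char) (i : Nat), pvScan ms s i = none → ∀ m ∈ ms, ¬ m <:+: s := by
  intro s
  induction s with
  | nil =>
    intro i _ m hm hinf
    exact hne m hm (List.eq_nil_of_infix_nil hinf)
  | cons c rest ih =>
    intro i h m hm hinf
    by_cases hc : ms.any (fun m => PySem.Chars.startswith (c :: rest) m) = true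
    · simp [pvScan, hc] at h
    · have h' : pvScan ms rest (i + 1) = none := by
        simpa [pvScan, hc] using h
      rcases List.infix_cons_iff.mp hinf with hpre | hinf'
      · exact hc (List.any_eq_true.mpr ⟨m, hm, (PySem.Chars.startswith_iff _ _).mpr hpre⟩)
      · exact ih (i + 1) h' m hm hinf'

-- If the scan returns j, some marker starts at j and none starts earlier (within the suffix).
theorem pv_scan_some (ms : List (List Char)) :
    ∀ (s : List Char) (i j : Nat), pvScan ms s i = some j →
      i ≤ j ∧ (∃ m ∈ ms, m <+: s.drop (j - i)) ∧
        ∀ k < j - i, ¬ ∃ m ∈ ms, m <+: s.drop k := by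
  intro s
  induction s with
  | nil => intro i j h; simp [pvScan] at h
  | cons c rest ih =>
    intro i j h
    by_cases hc : ms.any (fun m => PySem.Chars.startswith (c :: rest) m) = true
    · have hij : j = i := by simpa [pvScan, hc] using h.symm
      subst hij
      refine ⟨le_rfl, ?_, by omega⟩
      rcases List.any_eq_true.mp hc with ⟨m, hm, hsw⟩
      exact ⟨m, hm, by simpa using (PySem.Chars.startswith_iff _ _).mp hsw⟩
    · have h' : pvScan ms rest (i + 1) = some j := by simpa [pvScan, hc] using h
      obtain ⟨hle, ⟨m, hm, hpre⟩, hmin⟩ := ih (i + 1) j h'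
      refine ⟨by omega, ⟨m, hm, ?_⟩, ?_⟩
      · have heq : (c :: rest).drop (j - i) = rest.drop (j - (i + 1)) := by
          have : j - i = (j - (i + 1)) + 1 := by omega
          simp [this]
        rw [heq]; exact hpre
      · intro k hk hex
        match k with
        | 0 =>
          rcases hex with ⟨m', hm', hp'⟩
          exact hc (List.any_eq_true.mpr
            ⟨m', hm', (PySem.Chars.startswith_iff _ _).mpr (by simpa using hp')⟩)
        | k' + 1 =>
          exact hmin k' (by omega) (by simpa using hex)

-- Characterisation of A's min-fold over a list of (lowered) markers.
theorem pv_fold_spec (L : List Char) (ms : List (List Char)) :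
    ∀ acc : Int,
      ms.foldl (pvStep L) acc ≤ acc ∧
      (ms.foldl (pvStep L) acc = acc ∨
        ∃ sub ∈ ms, ms.foldl (pvStep L) acc = PySem.Chars.find L sub ∧
          PySem.Chars.find L sub ≠ -1) ∧
      ∀ sub ∈ ms, PySem.Chars.find L sub ≠ -1 →
        ms.foldl (pvStep L) acc ≤ PySem.Chars.find L sub := by
  induction ms with
  | nil => intro acc; exact ⟨le_rfl, Or.inl rfl, by simp⟩
  | cons m rest ih =>
    intro acc
    simp only [List.foldl_cons]
    by_cases hcond : PySem.Chars.find L m ≠ -1 ∧ PySem.Chars.find L m < acc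
    · obtain ⟨h1, h2, h3⟩ := ih (PySem.Chars.find L m)
      rw [show pvStep L acc m = PySem.Chars.find L m from if_pos hcond]
      refine ⟨by omega, ?_, ?_⟩
      · rcases h2 with h | ⟨sub, hs, he, hne⟩
        · exact Or.inr ⟨m, List.mem_cons_self, h, hcond.1⟩
        · exact Or.inr ⟨sub, List.mem_cons_of_mem _ hs, he, hne⟩
      · intro sub hs hne
        rcases List.mem_cons.mp hs with rfl | hs
        · omega
        · exact h3 sub hs hne
    · obtain ⟨h1, h2, h3⟩ := ih acc
      rw [show pvStep L acc m = acc from if_neg hcond]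
      refine ⟨h1, ?_, ?_⟩
      · rcases h2 with h | ⟨sub, hs, he, hne⟩
        · exact Or.inl h
        · exact Or.inr ⟨sub, List.mem_cons_of_mem _ hs, he, hne⟩
      · intro sub hs hne
        rcases List.mem_cons.mp hs with rfl | hs
        · have hge : -1 ≤ PySem.Chars.find L sub := PySem.Chars.neg_one_le_find L sub
          omega
        · exact h3 sub hs hne

-- ===== VERDICT (by name: the statement is the Claim_ definition above) =====
theorem find_dynamic_boundary_spec : Claim_equal_find_dynamic_boundary := by
  intro text _
  unfold Spec_find_dynamic_boundary find_dynamic_boundary_alt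
  rw [pvA_eq]
  have hlen : PySem.Str.len text = (text.toList.length : Int) := by simp
  set L := PySem.Chars.lower text.toList with hL
  set ms := pvMarkers.map (fun m => PySem.Chars.lower m.toList) with hms
  have hne : ∀ m ∈ ms, m ≠ [] := by rw [hms]; decide
  have hn : L.length = text.toList.length := pv_length_lower _
  obtain ⟨hle, hcase, hmin⟩ := pv_fold_spec L ms ((text.toList.length : Int))
  cases hscan : pvScan ms L 0 with
  | none =>
    have hnone : ∀ m ∈ ms, PySem.Chars.find L m = -1 := by
      intro m hm
      exact (PySem.Chars.find_eq_neg_one_iff L m).mpr (pv_scan_none ms hne L 0 hscan m hm)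
    rcases hcase with h | ⟨sub, hs, _, hne'⟩
    · simp only [hscan]
      rw [h, hlen]
    · exact absurd (hnone sub hs) hne'
  | some j =>
    obtain ⟨_, ⟨m, hm, hpre⟩, hminscan⟩ := pv_scan_some ms L 0 j hscan
    simp only [Nat.sub_zero] at hpre hminscan
    have hjlt : j < L.length := by
      by_contra hge
      have hd : L.drop j = [] := List.drop_eq_nil_of_le (by omega)
      rw [hd] at hpre
      exact hne m hm (List.prefix_nil.mp hpre)
    have hfind_ne : PySem.Chars.find L m ≠ -1 := by
      rw [PySem.Chars.find_ne_neg_one_iff]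
      exact hpre.isInfix.trans (List.drop_suffix j L).isInfix
    have hfind_nonneg : 0 ≤ PySem.Chars.find L m := by
      have := PySem.Chars.neg_one_le_find L m; omega
    obtain ⟨_, hfirst⟩ := PySem.Chars.find_spec hfind_nonneg
    have hfindle : PySem.Chars.find L m ≤ (j : Int) := by
      by_contra hgt
      exact hfirst j (by omega) hpre
    have hrle : ms.foldl (pvStep L) ((text.toList.length : Int)) ≤ (j : Int) :=
      le_trans (hmin m hm hfind_ne) hfindle
    have hrge : (j : Int) ≤ ms.foldl (pvStep L) ((text.toList.length : Int)) := by
      rcases hcase with h | ⟨sub, hs, he, hne'⟩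
      · rw [h]; omega
      · rw [he]
        have hnn : 0 ≤ PySem.Chars.find L sub := by
          have := PySem.Chars.neg_one_le_find L sub; omega
        obtain ⟨hpre', _⟩ := PySem.Chars.find_spec hnn
        by_contra hlt
        exact hminscan (PySem.Chars.find L sub).toNat (by omega) ⟨sub, hs, hpre'⟩
    simp only [hscan]
    omega
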